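-- pv_equiv track=rewrite | github.com/axt/prisma-smart-utils | psstat.py | read_usage_pattern_histogram
-- ===== SOURCE A (Python) =====
-- def read_usage_pattern_histogram(hist):
--     ret = [ False ] * 24
--     num = 1
--     for index in range(23, 0, -1):
--         if (hist & num) > 0:
--             ret[index] = True
--         num <<= 1
--     return ret
-- ===== SOURCE B (Python) =====
-- def read_usage_pattern_histogram(hist):
--     s = format(hist & ((1 << 23) - 1), '023b')
--     return [False] + [c == '1' for c in s]
-- ===== Notes on version B (the rewrite author's own statement) =====
-- stated objective: idiomatic
-- what changed: Replaces the 23-step shift-and-mask loop that mutates a preallocated list with a single mask to 23 bits, a binary-string formatting of the masked value, and a character-to-boolean comprehension prepended with the always-False slot.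
import Mathlib
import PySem

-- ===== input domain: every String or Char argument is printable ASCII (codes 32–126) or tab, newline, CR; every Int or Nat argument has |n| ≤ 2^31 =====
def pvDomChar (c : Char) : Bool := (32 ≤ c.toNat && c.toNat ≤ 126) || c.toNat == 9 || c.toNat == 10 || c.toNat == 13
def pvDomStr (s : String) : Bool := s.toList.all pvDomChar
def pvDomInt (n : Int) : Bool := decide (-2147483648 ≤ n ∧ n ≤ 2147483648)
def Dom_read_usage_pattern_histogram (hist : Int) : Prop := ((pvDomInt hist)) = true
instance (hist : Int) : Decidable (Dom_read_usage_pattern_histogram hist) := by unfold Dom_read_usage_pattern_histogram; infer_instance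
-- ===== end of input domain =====

-- ===== PORT A =====
-- B replaces A's shift-and-mask loop by formatting the 23-bit-masked value in binary
-- and mapping its characters to booleans (objective: more idiomatic; same behaviour).

-- loop body of A: 'if (hist & num) > 0: ret[index] = True' then 'num <<= 1'
-- (index ranges over 23..1, always a valid nonnegative index, so pySetD is exact here)
def pvStepA (hist : Int) (st : List Bool × Int) (index : Int) : List Bool × Int :=
  if 0 < PySem.Int.band hist st.2 then (PySem.List.pySetD st.1 index true, st.2 <<< (1 : Nat))
  else (st.1, st.2 <<< (1 : Nat))

def read_usage_pattern_histogram (hist : Int) : List Bool :=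
  ((PySem.List.pyRange 23 0 (-1)).foldl (pvStepA hist) (List.replicate 24 false, 1)).1

-- ===== PORT B =====
-- format(m, '023b') for 0 <= m < 2^23: the 23 binary digits of m, most significant first
-- (exact on that range, which is all B uses it on; m is nonnegative, so Lean's Int '/' '%'
-- coincide with Python's here)
def pvBin23 (m : Int) : List Char :=
  (List.range 23).map (fun i => if m / 2 ^ (22 - i) % 2 == 1 then '1' else '0')

def read_usage_pattern_histogram_alt (hist : Int) : List Bool :=
  let s := pvBin23 (PySem.Int.band hist ((1 <<< (23 : Nat)) - 1))
  false :: s.map (fun c => c == '1')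

-- ===== PRECONDITION & SPEC =====
def Spec_read_usage_pattern_histogram (hist : Int) (out : List Bool) : Prop := out = read_usage_pattern_histogram_alt hist
instance (hist : Int) (out : List Bool) : Decidable (Spec_read_usage_pattern_histogram hist out) := by unfold Spec_read_usage_pattern_histogram; infer_instance

-- ===== CLAIM (what is proved, stated in full; the proofs are below) =====
def Claim_equal_read_usage_pattern_histogram : Prop := ∀ (hist : Int), Dom_read_usage_pattern_histogram hist → Spec_read_usage_pattern_histogram hist (read_usage_pattern_histogram hist)

-- ===== LEMMAS AND PROOFS =====

-- the fold of A's loop body preserves the length of the list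
lemma pvFoldA_len (hist : Int) (l : List Int) : ∀ (st : List Bool × Int),
    ((l.foldl (pvStepA hist) st).1).length = st.1.length := by
  induction l with
  | nil => intro st; rfl
  | cons a l ih =>
    intro st
    simp only [List.foldl_cons, ih, pvStepA]
    split_ifs <;> simp [PySem.List.length_pySetD]

-- getD after a single set
lemma pvSetD_getD (l : List Bool) (m p : Nat) (v : Bool) :
    (l.set m v).getD p false = if m = p ∧ p < l.length then v else l.getD p false := by
  simp only [List.getD_eq_getElem?_getD, List.getElem?_set]
  split_ifs with h1 h2 h3 h3 <;> simp_all

lemma pvFoldA (hist : Int) : ∀ (j : Nat), j ≤ 23 → ∀ (ret : List Bool), ret.length = 24 →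
    ∀ (p : Nat),
    (((PySem.List.pyRange (j : Int) 0 (-1)).foldl (pvStepA hist) (ret, (2 : Int) ^ (23 - j))).1).getD p false
    = if 1 ≤ p ∧ p ≤ j then (decide (0 < PySem.Int.band hist ((2 : Int) ^ (23 - p))) || ret.getD p false)
      else ret.getD p false := by
  intro j
  induction j with
  | zero =>
    intro _ ret hlen p
    rw [PySem.List.pyRange_neg_one_eq_nil (by norm_num)]
    simp only [List.foldl_nil]
    rw [if_neg (by omega)]
  | succ j ih =>
    intro hj ret hlen p
    rw [PySem.List.pyRange_neg_one_cons (by push_cast; omega)]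
    have hcast : ((j + 1 : Nat) : Int) - 1 = (j : Nat) := by push_cast; ring
    rw [hcast]
    simp only [List.foldl_cons, pvStepA]
    have hshift : ((2 : Int) ^ (23 - (j + 1))) <<< (1 : Nat) = (2 : Int) ^ (23 - j) := by
      rw [Int.shiftLeft_eq, pow_one, ← pow_succ]
      congr 1
      omega
    by_cases hc : 0 < PySem.Int.band hist ((2 : Int) ^ (23 - (j + 1)))
    · rw [if_pos hc]
      simp only [PySem.List.pySetD_natCast, hshift]
      rw [ih (by omega) _ (by simp [hlen]) p]
      rw [pvSetD_getD]
      by_cases hp : p = j + 1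
      · subst hp
        rw [if_neg (by omega), if_pos (show j + 1 = j + 1 ∧ j + 1 < ret.length from ⟨rfl, by omega⟩),
            if_pos (show 1 ≤ j + 1 ∧ j + 1 ≤ j + 1 from by omega)]
        have hc' : 0 < PySem.Int.band hist ((2 : Int) ^ (22 - j)) := by
          have e : 23 - (j + 1) = 22 - j := by omega
          rwa [e] at hc
        simp [hc']
      · by_cases hp1 : 1 ≤ p ∧ p ≤ j
        · rw [if_pos hp1, if_neg (by omega), if_pos (by omega)]
        · rw [if_neg hp1, if_neg (by omega), if_neg (by omega)]
    · rw [if_neg hc]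
      simp only [hshift]
      rw [ih (by omega) _ hlen p]
      by_cases hp : p = j + 1
      · subst hp
        rw [if_neg (by omega), if_pos (by omega)]
        have : decide (0 < PySem.Int.band hist ((2 : Int) ^ (23 - (j + 1)))) = false := by
          simpa using hc
        rw [this]
        simp
      · by_cases hp1 : 1 ≤ p ∧ p ≤ j
        · rw [if_pos hp1, if_pos (by omega)]
        · rw [if_neg hp1, if_neg (by omega)]

-- A's result, index by index
lemma pvA_eq (hist : Int) :
    read_usage_pattern_histogram hist
    = false :: (List.range 23).map (fun i => decide (0 < PySem.Int.band hist ((2 : Int) ^ (22 - i)))) := by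
  have hlen : (read_usage_pattern_histogram hist).length = 24 := by
    unfold read_usage_pattern_histogram
    rw [pvFoldA_len]
    simp
  have hkey := pvFoldA hist 23 (le_refl _) (List.replicate 24 false) (by simp)
  norm_num at hkey
  apply List.ext_getElem
  · simp [hlen]
  · intro i h1 h2
    have hi : i < 24 := by rw [hlen] at h1; exact h1
    have hL : (read_usage_pattern_histogram hist)[i] = (read_usage_pattern_histogram hist).getD i false := by
      rw [List.getD_eq_getElem?_getD, List.getElem?_eq_getElem h1]
      rfl
    rw [hL]
    unfold read_usage_pattern_histogram
    rw [List.getD_eq_getElem?_getD, hkey i]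
    match i, hi with
    | 0, _ => simp
    | (i' + 1), hi =>
      have h3 : i' + 1 ≤ 23 := by omega
      have he : 23 - (i' + 1) = 22 - i' := by omega
      simp [h3, he]

-- B's result, index by index
lemma pvB_eq (hist : Int) :
    read_usage_pattern_histogram_alt hist
    = false :: (List.range 23).map
        (fun i => decide (PySem.Int.band hist ((2 : Int) ^ 23 - 1) / (2 : Int) ^ (22 - i) % 2 = 1)) := by
  simp only [read_usage_pattern_histogram_alt, pvBin23, List.map_map]
  have h : ((1 <<< (23 : Nat)) - 1 : Int) = 2 ^ 23 - 1 := by decide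
  rw [h]
  refine congrArg _ (List.map_congr_left ?_)
  intro i hi
  by_cases hc : PySem.Int.band hist ((2 : Int) ^ 23 - 1) / (2 : Int) ^ (22 - i) % 2 = 1 <;>
    simp only [Function.comp_apply, hc, if_pos, beq_iff_eq] <;> simp [hc]

-- complement arithmetic: dividing the 23-bit complement flips each bit
lemma pvComplBit (w k r : Nat) (hk : k < w) (hr : r < 2 ^ w) :
    ((2 ^ w - 1 - r) / 2 ^ k % 2 = 1) ↔ ¬ (r / 2 ^ k % 2 = 1) := by
  have hP : 0 < 2 ^ k := by positivity
  set q := r / 2 ^ k with hq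
  set s := r % 2 ^ k with hs
  have hrd : 2 ^ k * q + s = r := Nat.div_add_mod r (2 ^ k)
  have hsP : s < 2 ^ k := Nat.mod_lt _ hP
  have hE : 2 ^ (w - k) = 2 * 2 ^ (w - k - 1) := by
    rw [← pow_succ']
    congr 1
    omega
  have hwE : 2 ^ w = 2 ^ (w - k) * 2 ^ k := by
    rw [← pow_add]
    congr 1
    omega
  have hqE : q < 2 ^ (w - k) := by
    rw [hq, Nat.div_lt_iff_lt_mul hP]
    omega
  have hqP : (q + 1) * 2 ^ k ≤ 2 ^ (w - k) * 2 ^ k := Nat.mul_le_mul_right _ (by omega)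
  rw [add_mul, one_mul, mul_comm q (2 ^ k)] at hqP
  have hnum : 2 ^ w - 1 - r = 2 ^ k * (2 ^ (w - k) - 1 - q) + (2 ^ k - 1 - s) := by
    rw [Nat.mul_sub, Nat.mul_sub, Nat.mul_one, mul_comm (2 ^ k) (2 ^ (w - k))]
    omega
  have hdiv : (2 ^ w - 1 - r) / 2 ^ k = 2 ^ (w - k) - 1 - q := by
    rw [hnum, Nat.mul_add_div hP, Nat.div_eq_of_lt (by omega), add_zero]
  rw [hdiv]
  omega

-- Nat.testBit as the quotient-parity test
lemma pvTestBit (n i : Nat) : n.testBit i = decide (n / 2 ^ i % 2 = 1) := by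
  rw [Nat.testBit, Nat.shiftRight_eq_div_pow, Nat.one_and_eq_mod_two]
  rcases Nat.mod_two_eq_zero_or_one (n / 2 ^ i) with h | h <;> simp [h]

lemma pvBit (hist : Int) (k : Nat) (hk : k < 23) :
    (0 < PySem.Int.band hist ((2 : Int) ^ k)) ↔ (PySem.Int.band hist ((2 : Int) ^ 23 - 1) / (2 : Int) ^ k % 2 = 1) := by
  have h2k : ((2 : Int) ^ k) = ((2 ^ k : Nat) : Int) := by push_cast; ring
  have hmask : ((2 : Int) ^ 23 - 1) = ((2 ^ 23 - 1 : Nat) : Int) := by push_cast [Nat.one_le_two_pow]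
  by_cases hh : 0 ≤ hist
  · obtain ⟨a, rfl⟩ := Int.eq_ofNat_of_zero_le hh
    rw [h2k, hmask, PySem.Int.band_natCast, PySem.Int.band_natCast,
      Nat.and_two_pow_sub_one_eq_mod]
    have key : ((a % 2 ^ 23 : Nat) : Int) / ((2 ^ k : Nat) : Int) % 2 = 1
        ↔ ((a % 2 ^ 23) / 2 ^ k % 2 = 1) := by exact_mod_cast Iff.rfl
    rw [key]
    have hL : (0 : Int) < ((a &&& 2 ^ k : Nat) : Int) ↔ a.testBit k = true := by
      rw [Int.natCast_pos, Nat.and_two_pow]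
      cases h : a.testBit k <;> simp [h]
    have hR : ((a % 2 ^ 23) / 2 ^ k % 2 = 1) ↔ a.testBit k = true := by
      have h1 : (a % 2 ^ 23).testBit k = a.testBit k := by
        rw [Nat.testBit_mod_two_pow]; simp [hk]
      rw [← h1, pvTestBit, decide_eq_true_eq]
    rw [hL, hR]
  · have hbk : (0 : Int) ≤ (2 : Int) ^ k := by positivity
    have hbm : (0 : Int) ≤ (2 : Int) ^ 23 - 1 := by norm_num
    set n := (-hist - 1).toNat with hn
    have e1 : PySem.Int.band hist ((2 : Int) ^ k) = ((2 ^ k - (2 ^ k &&& n) : Nat) : Int) := by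
      rw [PySem.Int.band, if_neg hh, if_pos hbk]
      congr 1
    have e2 : PySem.Int.band hist ((2 : Int) ^ 23 - 1) = (((2 ^ 23 - 1) - (n % 2 ^ 23) : Nat) : Int) := by
      rw [PySem.Int.band, if_neg hh, if_pos hbm]
      congr 1
      rw [hmask, Int.toNat_natCast, Nat.and_comm, Nat.and_two_pow_sub_one_eq_mod]
    rw [e1, e2]
    have hL : (0 : Int) < ((2 ^ k - (2 ^ k &&& n) : Nat) : Int) ↔ ¬ (n.testBit k = true) := by
      rw [Int.natCast_pos, Nat.two_pow_and]
      cases h : n.testBit k <;> simp [h]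
    have key : (((2 ^ 23 - 1) - (n % 2 ^ 23) : Nat) : Int) / (2 : Int) ^ k % 2 = 1
        ↔ (((2 ^ 23 - 1) - (n % 2 ^ 23)) / 2 ^ k % 2 = 1) := by
      rw [h2k]; exact_mod_cast Iff.rfl
    rw [hL, key, pvComplBit 23 k _ hk (Nat.mod_lt _ (by positivity))]
    have : (n % 2 ^ 23) / 2 ^ k % 2 = 1 ↔ n.testBit k = true := by
      have h1 : (n % 2 ^ 23).testBit k = n.testBit k := by
        rw [Nat.testBit_mod_two_pow]; simp [hk]
      rw [← h1, pvTestBit, decide_eq_true_eq]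
    rw [this]

-- ===== VERDICT (by name: the statement is the Claim_ definition above) =====
theorem read_usage_pattern_histogram_spec : Claim_equal_read_usage_pattern_histogram := by
  intro hist _
  unfold Spec_read_usage_pattern_histogram
  rw [pvA_eq, pvB_eq]
  refine congrArg _ (List.map_congr_left ?_)
  intro i hi
  have hk : 22 - i < 23 := by omega
  simp only [decide_eq_decide]
  exact pvBit hist (22 - i) hk
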